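-- pv_equiv track=rewrite | github.com/Vinicoreia/AlgoRythm | python/EPI/incrementArray.py | incrementArray
-- ===== SOURCE A (Python) =====
-- from typing import List
--
-- def incrementArray(A: List[int]) -> List[int]:
--     if( not A):
--         return []
--
--     A[-1] += 1 # Increment the last number and see if it would result in a carry
--     carry = 0
--     for i in reversed(range(len(A))):
--         if(carry == 1):
--             A[i] += 1
--         if(A[i] == 10):
--             A[i] = 0
--             carry = 1
--         else:
--             carry = 0
--             break
--
--     if(carry == 1 or A[0] == 10):
--         A[0] = 1
--         A.append(0)
--     return A
-- ===== SOURCE B (Python) =====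
-- def incrementArray(A):
--     if not A:
--         return []
--     n = len(A)
--     k = 0
--     while k < n and A[n - 1 - k] == 9:
--         k += 1
--     if k == n:
--         A[:] = [1] + [0] * n
--     else:
--         A[:] = A[:n - 1 - k] + [A[n - 1 - k] + 1] + [0] * k
--     return A
-- ===== Notes on version B (the rewrite author's own statement) =====
-- stated objective: alternative
-- what changed: B replaces A's in-place carry-propagation loop (increment last, walk indices backwards with a carry flag and break, then a post-hoc overflow check) by counting the trailing run of 9s once and rebuilding the list by slicing: prefix ++ [pivot+1] ++ zeros, or a leading 1 plus zeros on full overflow.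
-- outside the precondition, e.g. on incrementArray([10, 5]): A returns [1, 6, 0], B returns [10, 6]
import Mathlib
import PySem

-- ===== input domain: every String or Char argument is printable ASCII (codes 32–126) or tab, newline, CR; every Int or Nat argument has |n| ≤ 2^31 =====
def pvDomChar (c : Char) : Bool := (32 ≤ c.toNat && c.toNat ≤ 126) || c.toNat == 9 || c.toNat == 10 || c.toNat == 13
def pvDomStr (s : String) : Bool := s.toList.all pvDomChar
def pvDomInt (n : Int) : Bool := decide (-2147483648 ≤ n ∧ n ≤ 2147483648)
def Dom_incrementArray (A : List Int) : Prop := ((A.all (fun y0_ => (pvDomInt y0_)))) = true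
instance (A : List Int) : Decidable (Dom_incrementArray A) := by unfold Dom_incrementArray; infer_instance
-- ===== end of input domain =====

-- B replaces A's carry-propagation loop by counting the trailing run of 9s and rebuilding the
-- list by slicing (objective: alternative). Both Pythons mutate A in place and return it; the
-- theorems here are about the RETURN value (on Pre_ the final mutation agrees too).

-- ===== PORT A =====
-- the for-loop over reversed(range(n)) with carry and break (first arg = remaining indices)
def aLoop : List Nat → List Int → Int → List Int × Int
  | [], l, carry => (l, carry)
  | i :: rest, l, carry =>
    let l' := if carry = 1 then l.set i (l.getD i 0 + 1) else l
    if l'.getD i 0 = 10 then aLoop rest (l'.set i 0) 1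
    else (l', 0)

def incrementArray (A : List Int) : List Int :=
  if A = [] then []
  else
    let n := A.length
    let A1 := A.set (n - 1) (A.getD (n - 1) 0 + 1)   -- A[-1] += 1 (A nonempty)
    let r := aLoop ((List.range n).reverse) A1 0
    if r.2 = 1 ∨ r.1.getD 0 0 = 10 then (r.1.set 0 1) ++ [0]
    else r.1

-- ===== PORT B =====
-- the while-loop 'while k < n and A[n-1-k] == 9: k += 1', fuel = n - k (so fuel > 0 ↔ k < n)
def bTrailGo (A : List Int) (n : Nat) : Nat → Nat → Nat
  | 0, k => k
  | r + 1, k => if A.getD (n - 1 - k) 0 = 9 then bTrailGo A n r (k + 1) else k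

def incrementArray_alt (A : List Int) : List Int :=
  if A = [] then []
  else
    let n := A.length
    let k := bTrailGo A n n 0
    if k = n then 1 :: List.replicate n 0
    else A.take (n - 1 - k) ++ [A.getD (n - 1 - k) 0 + 1] ++ List.replicate k 0

-- ===== PRECONDITION & SPEC =====
-- Pre_ excludes only the malformed inputs whose first element is the non-digit 10 while some
-- later element is not 9: a garbage corner outside the digit-array contract, where A's
-- carry-overflow heuristic ([1,…,0]) and B's plain increment are equally unspecified values.
def Pre_incrementArray (A : List Int) : Prop := ¬ (A.head? = some 10 ∧ ¬ (∀ x ∈ A.tail, x = 9))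
instance (A : List Int) : Decidable (Pre_incrementArray A) := by unfold Pre_incrementArray; infer_instance

def pvWitness_incrementArray : List Int := [1, 9, 9]

def Spec_incrementArray (A : List Int) (out : List Int) : Prop := out = incrementArray_alt A
instance (A : List Int) (out : List Int) : Decidable (Spec_incrementArray A out) := by unfold Spec_incrementArray; infer_instance

-- ===== CLAIM (what is proved, stated in full; the proofs are below) =====
def Claim_equal_incrementArray : Prop := ∀ (A : List Int), Dom_incrementArray A → Pre_incrementArray A → Spec_incrementArray A (incrementArray A)

-- ===== LEMMAS AND PROOFS =====

-- getD / set at the seam of an append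
theorem getD_mid (P Z : List Int) (p : Int) : (P ++ p :: Z).getD P.length 0 = p := by
  induction P with
  | nil => rfl
  | cons a P ih => simpa using ih

theorem set_mid (P Z : List Int) (p x : Int) : (P ++ p :: Z).set P.length x = P ++ x :: Z := by
  induction P with
  | nil => rfl
  | cons a P ih => simp [ih]

theorem range_succ_reverse (n : Nat) :
    (List.range (n + 1)).reverse = n :: (List.range n).reverse := by
  simp [List.range_succ]

theorem group_last (P : List Int) (p : Int) (k : Nat) :
    P ++ p :: List.replicate (k + 1) 9 = (P ++ p :: List.replicate k 9) ++ [(9 : Int)] := by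
  simp [List.replicate_succ' (n := k)]

-- the A-loop on P ++ [p] ++ 9…9 ++ Z with carry 1, entered at index |P| + j
theorem aLoop_run (j : Nat) : ∀ (P Z : List Int) (p : Int), p ≠ 9 →
    aLoop ((List.range (P.length + j + 1)).reverse) (P ++ p :: (List.replicate j 9 ++ Z)) 1
      = (P ++ (p + 1) :: (List.replicate j 0 ++ Z), 0) := by
  induction j with
  | zero =>
    intro P Z p hp
    rw [range_succ_reverse]
    have hne : p + 1 ≠ 10 := by omega
    simp [aLoop, hne]
  | succ j ih =>
    intro P Z p hp
    have hgroup : P ++ p :: (List.replicate (j + 1) 9 ++ Z)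
        = (P ++ p :: List.replicate j 9) ++ (9 : Int) :: Z := by
      simp [List.replicate_succ' (n := j)]
    have hlen : (P ++ p :: List.replicate j 9).length = P.length + j + 1 := by
      simp; omega
    rw [range_succ_reverse]
    show aLoop ((P.length + j + 1) :: (List.range (P.length + j + 1)).reverse) _ 1 = _
    rw [hgroup]
    rw [show P.length + j + 1 = (P ++ p :: List.replicate j 9).length from hlen.symm]
    simp only [aLoop, getD_mid, set_mid]
    norm_num
    have h3 : List.replicate (j + 1) (0 : Int) ++ Z = List.replicate j 0 ++ 0 :: Z := by
      simp [List.replicate_succ' (n := j)]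
    rw [h3]
    exact ih P ((0 : Int) :: Z) p hp

-- the A-loop on 9…9 ++ Z with carry 1, entered at index j - 1
theorem aLoop_nines (j : Nat) : ∀ (Z : List Int),
    aLoop ((List.range j).reverse) (List.replicate j 9 ++ Z) 1
      = (List.replicate j 0 ++ Z, 1) := by
  induction j with
  | zero => intro Z; simp [aLoop]
  | succ j ih =>
    intro Z
    rw [range_succ_reverse]
    have hg : List.replicate (j + 1) (9 : Int) ++ Z = List.replicate j 9 ++ (9 : Int) :: Z := by
      simp [List.replicate_succ' (n := j)]
    have hlen : (List.replicate j (9 : Int)).length = j := by simp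
    rw [hg, show j = (List.replicate j (9 : Int)).length from hlen.symm]
    simp only [aLoop]
    norm_num [getD_mid, set_mid]
    have h3 : List.replicate (j + 1) (0 : Int) ++ Z = List.replicate j 0 ++ 0 :: Z := by
      simp [List.replicate_succ' (n := j)]
    rw [h3]
    exact ih ((0 : Int) :: Z)

-- every nonempty list is all 9s or ends in (non-9) :: 9…9
theorem decomp (A : List Int) (h : A ≠ []) :
    (∃ n, n ≠ 0 ∧ A = List.replicate n 9) ∨
    (∃ P p k, p ≠ (9 : Int) ∧ A = P ++ p :: List.replicate k 9) := by
  induction A using List.reverseRecOn with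
  | nil => exact absurd rfl h
  | append_singleton xs x ih =>
    by_cases hx : x = (9 : Int)
    · subst hx
      rcases List.eq_nil_or_concat xs with hnil | _
      · subst hnil; exact Or.inl ⟨1, by simp, by simp⟩
      · rcases ih (by rintro rfl; simp_all) with ⟨n, hn, rfl⟩ | ⟨P, p, k, hp, rfl⟩
        · exact Or.inl ⟨n + 1, by omega, by simp [List.replicate_succ' (n := n)]⟩
        · exact Or.inr ⟨P, p, k + 1, hp, by rw [group_last]⟩
    · exact Or.inr ⟨xs, x, 0, hx, by simp⟩

theorem getD_replicate_nine (n i : Nat) (h : i < n) :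
    (List.replicate n (9 : Int)).getD i 0 = 9 := by
  simp [List.getD, h]

theorem getD_nine (P : List Int) (p : Int) (k i : Nat) (h : i < k) :
    (P ++ p :: List.replicate k 9).getD (P.length + 1 + i) 0 = 9 := by
  have hsplit : P ++ p :: List.replicate k 9
      = (P ++ p :: List.replicate i 9) ++ (9 : Int) :: List.replicate (k - 1 - i) 9 := by
    have h2 : k = i + ((k - 1 - i) + 1) := by omega
    rw [h2, List.replicate_add, List.replicate_succ]
    simp
  have hl : (P ++ p :: List.replicate i 9).length = P.length + 1 + i := by simp; omega
  rw [hsplit, show P.length + 1 + i = (P ++ p :: List.replicate i 9).length from hl.symm,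
    getD_mid]

-- B's while-loop returns the trailing-9 count
theorem bTrail_go (P : List Int) (p : Int) (k : Nat) (hp : p ≠ 9) :
    ∀ r j, j ≤ k → j + r = P.length + 1 + k →
      bTrailGo (P ++ p :: List.replicate k 9) (P.length + 1 + k) r j = k := by
  intro r
  induction r with
  | zero => intro j hj he; omega
  | succ r ih =>
    intro j hj he
    by_cases hjk : j = k
    · have hidx : P.length + 1 + k - 1 - j = P.length := by omega
      simp only [bTrailGo, hidx, getD_mid]
      simp [hp, hjk]
    · have hlt : j < k := by omega
      have hidx : P.length + 1 + k - 1 - j = P.length + 1 + (k - 1 - j) := by omega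
      have h9 := getD_nine P p k (k - 1 - j) (by omega)
      simp only [bTrailGo, hidx, h9]
      exact ih (j + 1) (by omega) (by omega)

theorem bTrail_nines (n : Nat) : ∀ r j, j + r = n →
    bTrailGo (List.replicate n 9) n r j = n := by
  intro r
  induction r with
  | zero => intro j he; simpa [bTrailGo] using he
  | succ r ih =>
    intro j he
    have h9 := getD_replicate_nine n (n - 1 - j) (by omega)
    simp only [bTrailGo, h9]
    exact ih (j + 1) (by omega)

-- B on the decomposed input
theorem altB_case2 (P : List Int) (p : Int) (k : Nat) (hp : p ≠ 9) :
    incrementArray_alt (P ++ p :: List.replicate k 9) = P ++ (p + 1) :: List.replicate k 0 := by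
  have hne : P ++ p :: List.replicate k 9 ≠ [] := by simp
  have hlen : (P ++ p :: List.replicate k 9).length = P.length + 1 + k := by simp; omega
  rw [incrementArray_alt, if_neg hne]
  simp only [hlen]
  rw [bTrail_go P p k hp (P.length + 1 + k) 0 (by omega) (by omega)]
  rw [if_neg (by omega)]
  have hidx : P.length + 1 + k - 1 - k = P.length := by omega
  rw [hidx, getD_mid]
  have htake : (P ++ p :: List.replicate k 9).take P.length = P := by
    rw [List.take_left' rfl]
  rw [htake]
  simp

theorem altB_nines (n : Nat) (hn : n ≠ 0) :
    incrementArray_alt (List.replicate n 9) = 1 :: List.replicate n 0 := by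
  have hne : List.replicate n (9 : Int) ≠ [] := by simp [hn]
  rw [incrementArray_alt, if_neg hne]
  simp only [List.length_replicate]
  rw [bTrail_nines n n 0 (by omega), if_pos rfl]

-- A's loop on the decomposed input
theorem portA_case2 (P : List Int) (p : Int) (k : Nat) (hp : p ≠ 9) :
    aLoop ((List.range (P.length + 1 + k)).reverse)
      ((P ++ p :: List.replicate k 9).set (P.length + k)
        ((P ++ p :: List.replicate k 9).getD (P.length + k) 0 + 1)) 0
      = (P ++ (p + 1) :: List.replicate k 0, 0) := by
  cases k with
  | zero =>
    have hne : p + 1 ≠ 10 := by omega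
    simp only [List.replicate_zero]
    rw [show P.length + 0 = P.length by omega, getD_mid, set_mid]
    rw [show P.length + 1 + 0 = P.length + 1 by omega, range_succ_reverse]
    simp [aLoop, hne]
  | succ k =>
    have hQ : (P ++ p :: List.replicate k 9).length = P.length + 1 + k := by simp; omega
    rw [group_last]
    rw [show P.length + (k + 1) = (P ++ p :: List.replicate k 9).length by omega]
    rw [getD_mid, set_mid]
    rw [show P.length + 1 + (k + 1) = (P ++ p :: List.replicate k 9).length + 1 by omega,
      range_succ_reverse]
    simp only [aLoop, getD_mid, set_mid]
    norm_num
    rw [show List.replicate (k + 1) (0 : Int) = List.replicate k 0 ++ [0] from by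
      simp [List.replicate_succ' (n := k)]]
    exact aLoop_run k P [(0 : Int)] p hp

-- A on the decomposed input (before the final overflow check)
theorem portA_case2_full (P : List Int) (p : Int) (k : Nat) (hp : p ≠ 9) :
    incrementArray (P ++ p :: List.replicate k 9)
      = (if (P ++ (p + 1) :: List.replicate k 0).getD 0 0 = 10
         then ((P ++ (p + 1) :: List.replicate k 0).set 0 1) ++ [0]
         else P ++ (p + 1) :: List.replicate k 0) := by
  have hne : P ++ p :: List.replicate k 9 ≠ [] := by simp
  have hlen : (P ++ p :: List.replicate k 9).length = P.length + 1 + k := by simp; omega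
  rw [incrementArray, if_neg hne]
  simp only [hlen]
  rw [show P.length + 1 + k - 1 = P.length + k by omega]
  rw [portA_case2 P p k hp]
  norm_num

theorem portA_nines (n : Nat) (hn : n ≠ 0) :
    incrementArray (List.replicate n 9) = 1 :: List.replicate n 0 := by
  obtain ⟨m, rfl⟩ : ∃ m, n = m + 1 := ⟨n - 1, by omega⟩
  have hne : List.replicate (m + 1) (9 : Int) ≠ [] := by simp
  rw [incrementArray, if_neg hne]
  simp only [List.length_replicate, Nat.add_sub_cancel]
  have hgd : (List.replicate (m + 1) (9 : Int)).getD m 0 = 9 :=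
    getD_replicate_nine (m + 1) m (by omega)
  rw [hgd]
  norm_num
  rw [show List.replicate (m + 1) (9 : Int) = List.replicate m 9 ++ [(9 : Int)] from by
    simp [List.replicate_succ' (n := m)]]
  have hst : (List.replicate m (9 : Int) ++ [(9 : Int)]).set m 10
      = List.replicate m 9 ++ [(10 : Int)] := by
    simpa using set_mid (List.replicate m 9) [] 9 10
  have hgd2 : (List.replicate m (9 : Int) ++ [(10 : Int)]).getD m 0 = 10 := by
    simpa using getD_mid (List.replicate m 9) [] 10
  rw [hst, range_succ_reverse]
  simp only [aLoop, hgd2]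
  norm_num
  rw [aLoop_nines m [(0 : Int)]]
  have h01 : List.replicate m (0 : Int) ++ [0] = 0 :: List.replicate m 0 := by
    simp [← List.replicate_succ' (n := m), List.replicate_succ]
  simp [h01, List.replicate_succ' (n := m)]

-- ===== VERDICT (by name: the statement is the Claim_ definition above) =====
theorem incrementArray_spec : Claim_equal_incrementArray := by
  intro A _ hpre
  unfold Spec_incrementArray
  by_cases hA : A = []
  · subst hA; rfl
  rcases decomp A hA with ⟨n, hn, rfl⟩ | ⟨P, p, k, hp, rfl⟩
  · rw [portA_nines n hn, altB_nines n hn]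
  · rw [altB_case2 P p k hp, portA_case2_full P p k hp]
    cases P with
    | nil =>
      have hne10 : p + 1 ≠ 10 := by omega
      simp [hne10]
    | cons q P' =>
      have hq : q ≠ 10 := by
        intro h10
        exact hpre ⟨by simp [h10], fun hall => hp (hall p (by simp))⟩
      simp [hq]
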